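-- pv_equiv track=rewrite | github.com/HarshJain-sudo/asana-backend-replication | scripts/generator_config.py | generate_class_name
-- ===== SOURCE A (Python) =====
-- def generate_class_name(operation_id: str, suffix: str = 'View') -> str:
--     """
--     Generate Python class name from operation ID.
--
--     Args:
--         operation_id: OpenAPI operation ID
--         suffix: Class name suffix
--
--     Returns:
--         PascalCase class name
--     """
--     # Convert to words
--     words = []
--     current_word = []
--
--     for char in operation_id:
--         if char.isupper() and current_word:
--             words.append(''.join(current_word))
--             current_word = [char]
--         elif char in ['_', '-']:
--             if current_word:
--                 words.append(''.join(current_word))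
--                 current_word = []
--         else:
--             current_word.append(char)
--
--     if current_word:
--         words.append(''.join(current_word))
--
--     # Capitalize each word
--     class_name = ''.join(word.capitalize() for word in words)
--
--     # Add suffix if not present
--     if not class_name.endswith(suffix):
--         class_name += suffix
--
--     return class_name
-- ===== SOURCE B (Python) =====
-- def generate_class_name(operation_id: str, suffix: str = 'View') -> str:
--     """Single-pass rewrite: stream chars straight into the output, uppercasing the
--     first char of each word, instead of building a word list and capitalizing in a second pass."""
--     out = []
--     start = True  # flag: the next letter written is the first of its word
--     for c in operation_id:
--         if c in '_-':
--             start = True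
--         elif start or c.isupper():
--             out.append(c.upper())
--             start = False
--         else:
--             out.append(c.lower())
--     class_name = ''.join(out)
--     if not class_name.endswith(suffix):
--         class_name += suffix
--     return class_name
-- ===== Notes on version B (the rewrite author's own statement) =====
-- stated objective: simpler
-- what changed: A tokenizes into a word list with a char-buffer state machine and then capitalizes-and-joins the words in a second pass; B is a single streaming pass that writes each output char directly, keeping only one boolean flag marking where a new word begins and no word list.
import Mathlib
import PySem

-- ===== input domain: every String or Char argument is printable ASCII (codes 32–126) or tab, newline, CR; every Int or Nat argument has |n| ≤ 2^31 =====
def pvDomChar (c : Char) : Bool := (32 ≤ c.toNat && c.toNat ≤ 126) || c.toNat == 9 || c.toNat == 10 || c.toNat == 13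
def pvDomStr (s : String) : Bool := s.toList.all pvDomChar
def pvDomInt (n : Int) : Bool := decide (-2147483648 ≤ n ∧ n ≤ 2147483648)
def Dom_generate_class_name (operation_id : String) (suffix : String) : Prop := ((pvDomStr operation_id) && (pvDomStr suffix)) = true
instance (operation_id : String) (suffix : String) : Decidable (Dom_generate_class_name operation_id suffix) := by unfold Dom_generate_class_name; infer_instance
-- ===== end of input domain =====

-- B replaces A's two-phase tokenize-then-capitalize with one streaming pass (simpler; same O(n) cost).

-- ===== PORT A =====
-- word.capitalize(): first char uppercased, rest lowercased — exact on the ASCII domain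
def pvCapitalize (cs : List Char) : List Char :=
  match cs with
  | [] => []
  | c :: rest => PySem.Chars.upperChar c :: PySem.Chars.lower rest

-- one iteration of A's for-loop: state = (words, current_word)
def pvStepA (st : List (List Char) × List Char) (c : Char) : List (List Char) × List Char :=
  if PySem.Chars.isupper c && !st.2.isEmpty then (st.1 ++ [st.2], [c])
  else if c == '_' || c == '-' then
    (if st.2.isEmpty then st else (st.1 ++ [st.2], []))
  else (st.1, st.2 ++ [c])

def generate_class_name (operation_id : String) (suffix : String) : String :=
  let st := operation_id.toList.foldl pvStepA ([], [])
  let words := if st.2.isEmpty then st.1 else st.1 ++ [st.2]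
  let className := PySem.Chars.join [] (words.map pvCapitalize)
  let className :=
    if !(PySem.Chars.endswith className suffix.toList) then className ++ suffix.toList
    else className
  String.ofList className

-- ===== PORT B =====
-- one iteration of B's for-loop: state = (out, start)
def pvStepB (st : List Char × Bool) (c : Char) : List Char × Bool :=
  if c == '_' || c == '-' then (st.1, true)
  else if st.2 || PySem.Chars.isupper c then (st.1 ++ [PySem.Chars.upperChar c], false)
  else (st.1 ++ [PySem.Chars.lowerChar c], false)

def generate_class_name_alt (operation_id : String) (suffix : String) : String :=
  let st := operation_id.toList.foldl pvStepB ([], true)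
  let className := st.1
  if !(PySem.Chars.endswith className suffix.toList) then String.ofList (className ++ suffix.toList)
  else String.ofList className

-- ===== PRECONDITION & SPEC =====
def Spec_generate_class_name (operation_id : String) (suffix : String) (out : String) : Prop := out = generate_class_name_alt operation_id suffix
instance (operation_id : String) (suffix : String) (out : String) : Decidable (Spec_generate_class_name operation_id suffix out) := by unfold Spec_generate_class_name; infer_instance

-- ===== CLAIM (what is proved, stated in full; the proofs are below) =====
def Claim_equal_generate_class_name : Prop := ∀ (operation_id : String) (suffix : String), Dom_generate_class_name operation_id suffix → Spec_generate_class_name operation_id suffix (generate_class_name operation_id suffix)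

-- ===== LEMMAS AND PROOFS =====

-- ''.join = flatten
theorem pv_join_nil_eq_flatten (xs : List (List Char)) : PySem.Chars.join [] xs = xs.flatten := by
  induction xs with
  | nil => rfl
  | cons a t ih => cases t <;> simp_all [PySem.Chars.join, List.intercalate, List.intersperse, List.flatten]

theorem pvCapitalize_append_of_ne_nil (cur : List Char) (c : Char) (h : cur ≠ []) :
    pvCapitalize (cur ++ [c]) = pvCapitalize cur ++ [PySem.Chars.lowerChar c] := by
  cases cur with
  | nil => exact absurd rfl h
  | cons a t => simp [pvCapitalize, PySem.Chars.lower]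

-- the capitalized-joined view of A's state, after the final flush
def pvOutA (st : List (List Char) × List Char) : List Char :=
  ((if st.2.isEmpty then st.1 else st.1 ++ [st.2]).map pvCapitalize).flatten

theorem pvOutA_eq (st : List (List Char) × List Char) :
    pvOutA st = (st.1.map pvCapitalize).flatten ++ pvCapitalize st.2 := by
  unfold pvOutA
  cases h : st.2 with
  | nil => simp [pvCapitalize]
  | cons a t => simp

-- loop invariant: B's running output is A's capitalized-joined flushed state,
-- and B's 'start' flag is 'current_word is empty'
theorem pv_loop_inv (s : List Char) : ∀ (words : List (List Char)) (cur : List Char),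
    (s.foldl pvStepB ((words.map pvCapitalize).flatten ++ pvCapitalize cur, cur.isEmpty)).1
      = pvOutA (s.foldl pvStepA (words, cur)) := by
  induction s with
  | nil =>
    intro words cur
    simp [List.foldl, pvOutA_eq]
  | cons c rest ih =>
    intro words cur
    simp only [List.foldl]
    by_cases hsep : (c == '_' || c == '-') = true
    · -- separator: the uppercase test is false ('_' and '-' are not A-Z)
      have hu : PySem.Chars.isupper c = false := by
        rcases (by simpa using hsep : c = '_' ∨ c = '-') with rfl | rfl <;> decide
      cases cur with
      | nil =>
        rw [show pvStepA (words, ([] : List Char)) c = (words, []) from by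
              simp [pvStepA, hsep, hu],
            show pvStepB ((words.map pvCapitalize).flatten ++ pvCapitalize [], [].isEmpty) c
               = ((words.map pvCapitalize).flatten ++ pvCapitalize [], ([] : List Char).isEmpty) from by
              simp [pvStepB, hsep]]
        exact ih words []
      | cons a t =>
        rw [show pvStepA (words, a :: t) c = (words ++ [a :: t], []) from by
              simp [pvStepA, hsep, hu],
            show pvStepB ((words.map pvCapitalize).flatten ++ pvCapitalize (a :: t), (a :: t).isEmpty) c
               = (((words ++ [a :: t]).map pvCapitalize).flatten ++ pvCapitalize [], ([] : List Char).isEmpty) from by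
              simp [pvStepB, hsep, pvCapitalize]]
        exact ih (words ++ [a :: t]) []
    · -- not a separator
      have hne : ¬c = '_' ∧ ¬c = '-' := by simpa [not_or] using hsep
      by_cases hup : PySem.Chars.isupper c = true
      · cases cur with
        | nil =>
          -- uppercase char beginning a word: A appends it to the empty current_word
          rw [show pvStepA (words, ([] : List Char)) c = (words, [c]) from by
                simp [pvStepA, hup] <;> exact hne,
              show pvStepB ((words.map pvCapitalize).flatten ++ pvCapitalize [], [].isEmpty) c
                 = ((words.map pvCapitalize).flatten ++ pvCapitalize [c], ([c] : List Char).isEmpty) from by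
                simp [pvStepB, hsep, hup, pvCapitalize, PySem.Chars.lower]]
          exact ih words [c]
        | cons a t =>
          -- uppercase char starts a new word
          rw [show pvStepA (words, a :: t) c = (words ++ [a :: t], [c]) from by
                simp [pvStepA, hup],
              show pvStepB ((words.map pvCapitalize).flatten ++ pvCapitalize (a :: t), (a :: t).isEmpty) c
                 = (((words ++ [a :: t]).map pvCapitalize).flatten ++ pvCapitalize [c], ([c] : List Char).isEmpty) from by
                simp [pvStepB, hsep, hup, pvCapitalize, PySem.Chars.lower]]
          exact ih (words ++ [a :: t]) [c]
      · cases cur with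
        | nil =>
          -- ordinary char beginning a word
          rw [show pvStepA (words, ([] : List Char)) c = (words, [c]) from by
                simp [pvStepA, hup] <;> exact hne,
              show pvStepB ((words.map pvCapitalize).flatten ++ pvCapitalize [], [].isEmpty) c
                 = ((words.map pvCapitalize).flatten ++ pvCapitalize [c], ([c] : List Char).isEmpty) from by
                simp [pvStepB, hsep, hup, pvCapitalize, PySem.Chars.lower]]
          exact ih words [c]
        | cons a t =>
          -- ordinary char inside a word
          rw [show pvStepA (words, a :: t) c = (words, a :: t ++ [c]) from by
                simp [pvStepA, hup] <;> exact hne,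
              show pvStepB ((words.map pvCapitalize).flatten ++ pvCapitalize (a :: t), (a :: t).isEmpty) c
                 = ((words.map pvCapitalize).flatten ++ pvCapitalize (a :: t ++ [c]), (a :: t ++ [c]).isEmpty) from by
                rw [show (a :: t ++ [c]) = (a :: t) ++ [c] from rfl,
                    pvCapitalize_append_of_ne_nil (a :: t) c (by simp)]
                simp [pvStepB, hsep, hup]]
          exact ih words (a :: t ++ [c])

-- ===== VERDICT (by name: the statement is the Claim_ definition above) =====
theorem generate_class_name_spec : Claim_equal_generate_class_name := by
  intro operation_id suffix _
  unfold Spec_generate_class_name generate_class_name generate_class_name_alt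
  simp only [pv_join_nil_eq_flatten]
  have h := pv_loop_inv operation_id.toList [] []
  simp only [pvOutA, List.map_nil, List.flatten_nil, pvCapitalize, List.nil_append,
             List.isEmpty_nil] at h
  rw [← h]
  split <;> rfl
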